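-- pv_equiv track=rewrite | github.com/merzi/hyperskill_python | Dominoes/Dominoes/task/dominoes/dominoes.py | find_highest_pair
-- ===== SOURCE A (Python) =====
-- def find_highest_pair(player_stock):
--     highest_key = -1
--     for key in range(len(player_stock)):
--         if player_stock[key][0] == player_stock[key][1]:
--             if highest_key == -1:
--                 highest_key = key
--             elif player_stock[key][0] > player_stock[highest_key][0]:
--                 highest_key = key
--
--     return highest_key
-- ===== SOURCE B (Python) =====
-- def find_highest_pair(player_stock):
--     doubles = [x for (x, y) in player_stock if x == y]
--     if not doubles:
--         return -1
--     best = max(doubles)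
--     return player_stock.index((best, best))
-- ===== Notes on version B (the rewrite author's own statement) =====
-- stated objective: alternative
-- what changed: A tracks the best index in a single running-max scan with a -1 sentinel; B never tracks indices during the scan: it collects the pip values of the doubles, takes their maximum, and then locates the answer as the first occurrence of the tuple (best, best) with list.index.
import Mathlib
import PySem

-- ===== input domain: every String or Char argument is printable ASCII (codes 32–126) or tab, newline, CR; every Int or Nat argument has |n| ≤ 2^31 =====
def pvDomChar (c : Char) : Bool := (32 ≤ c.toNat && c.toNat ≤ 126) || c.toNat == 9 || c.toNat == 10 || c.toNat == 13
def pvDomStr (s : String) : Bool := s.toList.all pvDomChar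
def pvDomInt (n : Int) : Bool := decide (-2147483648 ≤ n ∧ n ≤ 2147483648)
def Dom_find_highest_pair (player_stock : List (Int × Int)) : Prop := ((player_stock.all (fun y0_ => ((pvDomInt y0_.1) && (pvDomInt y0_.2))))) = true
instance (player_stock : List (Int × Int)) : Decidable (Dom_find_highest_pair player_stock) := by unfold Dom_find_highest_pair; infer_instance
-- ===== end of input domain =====

-- B avoids tracking a best index during the scan: it takes the maximum pip value of the
-- doubles and then locates the first occurrence of the tuple (best, best) with list.index;
-- same O(n) cost, a different algorithm (value-max + tuple search vs index argmax scan).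

-- ===== PORT A =====
def find_highest_pair (player_stock : List (Int × Int)) : Int :=
  (PySem.List.pyRange 0 (PySem.List.len player_stock) 1).foldl
    (fun highest_key key =>
      if (PySem.List.pyGetD player_stock key (0, 0)).1
           == (PySem.List.pyGetD player_stock key (0, 0)).2 then
        if highest_key == -1 then key
        else if (PySem.List.pyGetD player_stock key (0, 0)).1
                  > (PySem.List.pyGetD player_stock highest_key (0, 0)).1 then key
        else highest_key
      else highest_key)
    (-1)

-- ===== PORT B =====
def find_highest_pair_alt (player_stock : List (Int × Int)) : Int :=
  let doubles := (player_stock.filter (fun p => p.1 == p.2)).map (fun p => p.1)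
  if doubles = [] then -1
  else
    let best := (PySem.List.max? doubles (fun v => v)).getD 0
    (((PySem.List.index? player_stock (best, best)).getD 0 : Nat) : Int)

-- ===== PRECONDITION & SPEC =====
def Spec_find_highest_pair (player_stock : List (Int × Int)) (out : Int) : Prop := out = find_highest_pair_alt player_stock
instance (player_stock : List (Int × Int)) (out : Int) : Decidable (Spec_find_highest_pair player_stock out) := by unfold Spec_find_highest_pair; infer_instance

-- ===== CLAIM (what is proved, stated in full; the proofs are below) =====
def Claim_equal_find_highest_pair : Prop := ∀ (player_stock : List (Int × Int)), Dom_find_highest_pair player_stock → Spec_find_highest_pair player_stock (find_highest_pair player_stock)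

-- ===== LEMMAS AND PROOFS =====

-- the state of A's loop, viewed as an Option (the -1 sentinel becomes none)
def pvOptA (h : Int) : Option Int := if h = -1 then none else some h

-- A's loop step on the Option view: keep the first index attaining the running maximum
def pvMaxStep (ps : List (Int × Int)) (acc : Option Int) (x : Int) : Option Int :=
  match acc with
  | none => some x
  | some m => if (PySem.List.pyGetD ps m (0, 0)).1 < (PySem.List.pyGetD ps x (0, 0)).1
              then some x else some m

-- Core invariant: A's fold over a list of nonnegative indices, started at h (= -1 or ≥ 0),
-- equals the argmax fold over the filtered doubles, started at pvOptA h.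
theorem pvLoop (ps : List (Int × Int)) (L : List Int) (h : Int)
    (hh : h = -1 ∨ 0 ≤ h) (hL : ∀ i ∈ L, 0 ≤ i) :
    pvOptA (L.foldl
      (fun highest_key key =>
        if (PySem.List.pyGetD ps key (0, 0)).1 == (PySem.List.pyGetD ps key (0, 0)).2 then
          if highest_key == -1 then key
          else if (PySem.List.pyGetD ps key (0, 0)).1
                    > (PySem.List.pyGetD ps highest_key (0, 0)).1 then key
          else highest_key
        else highest_key) h)
    = (L.filter (fun i => (PySem.List.pyGetD ps i (0, 0)).1
                  == (PySem.List.pyGetD ps i (0, 0)).2)).foldl (pvMaxStep ps) (pvOptA h) := by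
  induction L generalizing h with
  | nil => simp
  | cons i L ih =>
    have hi : (0 : Int) ≤ i := hL i (by simp)
    have hL' : ∀ j ∈ L, (0 : Int) ≤ j := fun j hj => hL j (by simp [hj])
    have hOi : pvOptA i = some i := by unfold pvOptA; rw [if_neg (by omega)]
    by_cases hd : ((PySem.List.pyGetD ps i (0, 0)).1 == (PySem.List.pyGetD ps i (0, 0)).2) = true
    · rcases hh with hm | hpos
      · subst hm
        simp only [List.foldl_cons, List.filter_cons, hd, beq_self_eq_true, if_true]
        rw [ih i (Or.inr hi) hL', hOi]
        rfl
      · have hne : (h == (-1 : Int)) = false := by simp; omega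
        have hOpt : pvOptA h = some h := by unfold pvOptA; rw [if_neg (by omega)]
        simp only [List.foldl_cons, List.filter_cons, hd, if_true, hne, Bool.false_eq_true,
          if_false]
        by_cases hgt : (PySem.List.pyGetD ps h (0, 0)).1 < (PySem.List.pyGetD ps i (0, 0)).1
        · rw [if_pos hgt, ih i (Or.inr hi) hL', hOi]
          simp [pvMaxStep, hOpt, hgt]
        · rw [if_neg hgt, ih h (Or.inr hpos) hL', hOpt]
          simp [pvMaxStep, hgt]
    · simp only [List.foldl_cons, List.filter_cons, hd, Bool.false_eq_true, if_false]
      exact ih h hh hL'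

-- the argmax fold returns the FIRST element attaining the maximum (or the seed if no element beats it)
theorem pvFoldChar (ps : List (Int × Int)) (D : List Int) (m : Int) :
    ∃ j, D.foldl (pvMaxStep ps) (some m) = some j ∧
      ((j = m ∧ ∀ i ∈ D, (PySem.List.pyGetD ps i (0, 0)).1 ≤ (PySem.List.pyGetD ps m (0, 0)).1) ∨
       (∃ pre suf, D = pre ++ j :: suf ∧
          (PySem.List.pyGetD ps m (0, 0)).1 < (PySem.List.pyGetD ps j (0, 0)).1 ∧
          (∀ i ∈ pre, (PySem.List.pyGetD ps i (0, 0)).1 < (PySem.List.pyGetD ps j (0, 0)).1) ∧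
          (∀ i ∈ suf, (PySem.List.pyGetD ps i (0, 0)).1 ≤ (PySem.List.pyGetD ps j (0, 0)).1))) := by
  induction D generalizing m with
  | nil => exact ⟨m, rfl, Or.inl ⟨rfl, by simp⟩⟩
  | cons x D ih =>
    by_cases hx : (PySem.List.pyGetD ps m (0, 0)).1 < (PySem.List.pyGetD ps x (0, 0)).1
    · have hstep : pvMaxStep ps (some m) x = some x := by simp [pvMaxStep, hx]
      obtain ⟨j, hj, hc⟩ := ih x
      refine ⟨j, by rw [List.foldl_cons, hstep]; exact hj, Or.inr ?_⟩
      rcases hc with ⟨rfl, hall⟩ | ⟨pre, suf, rfl, hmx, hpre, hsuf⟩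
      · exact ⟨[], D, rfl, hx, by simp, hall⟩
      · exact ⟨x :: pre, suf, rfl, lt_trans hx hmx,
          by intro i hi; rcases List.mem_cons.mp hi with rfl | hi
             · exact hmx
             · exact hpre i hi, hsuf⟩
    · have hstep : pvMaxStep ps (some m) x = some m := by simp [pvMaxStep, hx]
      obtain ⟨j, hj, hc⟩ := ih m
      refine ⟨j, by rw [List.foldl_cons, hstep]; exact hj, ?_⟩
      rcases hc with ⟨rfl, hall⟩ | ⟨pre, suf, rfl, hmx, hpre, hsuf⟩
      · exact Or.inl ⟨rfl, by
          intro i hi; rcases List.mem_cons.mp hi with rfl | hi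
          · omega
          · exact hall i hi⟩
      · exact Or.inr ⟨x :: pre, suf, rfl, hmx,
          by intro i hi; rcases List.mem_cons.mp hi with rfl | hi
             · omega
             · exact hpre i hi, hsuf⟩

-- mapping an index through pyGetD turns the filtered index list into the filtered pair list
theorem pvMapFilter (l : List Int) (f : Int → Int × Int) :
    ((l.map f).filter fun p => p.1 == p.2)
      = (l.filter fun x => (f x).1 == (f x).2).map f := by
  induction l with
  | nil => rfl
  | cons x l ih =>
    by_cases h : ((f x).1 == (f x).2) = true
    · simp [h, ih]
    · simp [h, ih]

-- ===== VERDICT (by name: the statement is the Claim_ definition above) =====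
theorem find_highest_pair_spec : Claim_equal_find_highest_pair := by
  intro ps _
  unfold Spec_find_highest_pair
  simp only [find_highest_pair, find_highest_pair_alt]
  set D := (PySem.List.pyRange 0 (PySem.List.len ps) 1).filter
    (fun i => (PySem.List.pyGetD ps i (0, 0)).1 == (PySem.List.pyGetD ps i (0, 0)).2) with hD
  have hmem : ∀ i ∈ PySem.List.pyRange 0 (PySem.List.len ps) 1, (0 : Int) ≤ i := by
    intro i hi; exact (PySem.List.mem_pyRange_one.mp hi).1
  have hloop := pvLoop ps (PySem.List.pyRange 0 (PySem.List.len ps) 1) (-1) (Or.inl rfl) hmem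
  have h0 : pvOptA (-1) = none := rfl
  rw [h0, ← hD] at hloop
  -- doubles (the value list) = D.map val
  have hdm : (ps.filter (fun p => p.1 == p.2)).map (fun p => p.1)
      = D.map (fun i => (PySem.List.pyGetD ps i (0, 0)).1) := by
    have h1 : (PySem.List.pyRange 0 (PySem.List.len ps) 1).map
        (fun j => PySem.List.pyGetD ps j (0, 0)) = ps :=
      PySem.List.map_pyGetD_pyRange_zero ps (0, 0)
    calc (ps.filter (fun p => p.1 == p.2)).map (fun p => p.1)
        = (((PySem.List.pyRange 0 (PySem.List.len ps) 1).map
            (fun j => PySem.List.pyGetD ps j (0, 0))).filter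
            (fun p => p.1 == p.2)).map (fun p => p.1) := by rw [h1]
      _ = (D.map (fun j => PySem.List.pyGetD ps j (0, 0))).map (fun p => p.1) := by
            rw [hD, pvMapFilter _ (fun j => PySem.List.pyGetD ps j (0, 0))]
      _ = D.map (fun i => (PySem.List.pyGetD ps i (0, 0)).1) := by rw [List.map_map]; rfl
  cases hDc : D with
  | nil =>
    -- no doubles: A returns -1 and B takes the empty branch
    rw [hDc, List.foldl_nil] at hloop
    have hA : (PySem.List.pyRange 0 (PySem.List.len ps) 1).foldl
        (fun highest_key key =>
          if (PySem.List.pyGetD ps key (0, 0)).1 == (PySem.List.pyGetD ps key (0, 0)).2 then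
            if highest_key == -1 then key
            else if (PySem.List.pyGetD ps key (0, 0)).1
                      > (PySem.List.pyGetD ps highest_key (0, 0)).1 then key
            else highest_key
          else highest_key) (-1) = -1 := by
      by_contra hne
      simp only [pvOptA, if_neg hne] at hloop
      exact Option.some_ne_none _ hloop
    rw [hA]
    rw [hdm, hDc]
    simp
  | cons d D' =>
    rw [hDc, List.foldl_cons] at hloop
    have hstep0 : pvMaxStep ps none d = some d := rfl
    rw [hstep0] at hloop
    obtain ⟨j, hj, hc⟩ := pvFoldChar ps D' d
    rw [hj] at hloop
    -- A's result equals j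
    have hAj : (PySem.List.pyRange 0 (PySem.List.len ps) 1).foldl
        (fun highest_key key =>
          if (PySem.List.pyGetD ps key (0, 0)).1 == (PySem.List.pyGetD ps key (0, 0)).2 then
            if highest_key == -1 then key
            else if (PySem.List.pyGetD ps key (0, 0)).1
                      > (PySem.List.pyGetD ps highest_key (0, 0)).1 then key
            else highest_key
          else highest_key) (-1) = j := by
      set A := (PySem.List.pyRange 0 (PySem.List.len ps) 1).foldl
        (fun highest_key key =>
          if (PySem.List.pyGetD ps key (0, 0)).1 == (PySem.List.pyGetD ps key (0, 0)).2 then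
            if highest_key == -1 then key
            else if (PySem.List.pyGetD ps key (0, 0)).1
                      > (PySem.List.pyGetD ps highest_key (0, 0)).1 then key
            else highest_key
          else highest_key) (-1) with hAdef
    -- unfold pvOptA at hloop
      by_cases hA1 : A = -1
      · rw [hA1] at hloop; simp [pvOptA] at hloop
      · simp only [pvOptA, if_neg hA1] at hloop
        exact Option.some.inj hloop
    rw [hAj]
    -- facts about j and D
    have hjD : j ∈ D := by
      rw [hDc]
      rcases hc with ⟨rfl, _⟩ | ⟨pre, suf, hsplit, _, _, _⟩
      · exact List.mem_cons_self
      · rw [hsplit]; exact List.mem_cons_of_mem _ (by simp)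
    have hmemD : ∀ i ∈ D, (0 ≤ i ∧ i < (ps.length : Int)) ∧
        ((PySem.List.pyGetD ps i (0, 0)).1 == (PySem.List.pyGetD ps i (0, 0)).2) = true := by
      intro i hi
      rw [hD, List.mem_filter] at hi
      obtain ⟨hr, hp⟩ := hi
      have := PySem.List.mem_pyRange_one.mp hr
      simp only [PySem.List.len_eq] at this
      exact ⟨this, hp⟩
    have hjmax : ∀ i ∈ D, (PySem.List.pyGetD ps i (0, 0)).1 ≤ (PySem.List.pyGetD ps j (0, 0)).1 := by
      intro i hi
      rw [hDc] at hi
      rcases hc with ⟨rfl, hall⟩ | ⟨pre, suf, hsplit, hmx, hpre, hsuf⟩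
      · rcases List.mem_cons.mp hi with rfl | hi
        · exact le_refl _
        · exact hall i hi
      · rcases List.mem_cons.mp hi with rfl | hi
        · exact le_of_lt hmx
        · rw [hsplit] at hi
          rcases List.mem_append.mp hi with hi | hi
          · exact le_of_lt (hpre i hi)
          · rcases List.mem_cons.mp hi with rfl | hi
            · exact le_refl _
            · exact hsuf i hi
    -- strictness before j in D
    have hjstrict : ∀ i ∈ D, i < j →
        (PySem.List.pyGetD ps i (0, 0)).1 < (PySem.List.pyGetD ps j (0, 0)).1 := by
      have hsorted : D.Pairwise (· < ·) := by
        rw [hD]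
        exact (PySem.List.pairwise_lt_pyRange_one 0 (PySem.List.len ps)).filter _
      intro i hi hij
      rw [hDc] at hi hsorted
      rcases hc with ⟨rfl, _⟩ | ⟨pre, suf, hsplit, hmx, hpre, hsuf⟩
      · -- j = d is the head; every other member is > d, contradiction with i < j
        rcases List.mem_cons.mp hi with rfl | hi
        · omega
        · have := (List.pairwise_cons.mp hsorted).1 i hi; omega
      · rw [hsplit] at hi hsorted
        rcases List.mem_cons.mp hi with rfl | hi
        · exact hmx
        · rcases List.mem_append.mp hi with hi | hi
          · exact hpre i hi
          · rcases List.mem_cons.mp hi with rfl | hi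
            · omega
            · -- i ∈ suf means j < i, contradicting i < j
              exfalso
              have : j < i := by
                have h2 := (List.pairwise_cons.mp hsorted).2
                have h3 := (List.pairwise_append.mp h2).2.2
                have h4 := (List.pairwise_cons.mp (List.pairwise_append.mp h2).2.1).1
                exact h4 i hi
              omega
    obtain ⟨⟨hj0, hjn⟩, hjdbl⟩ := hmemD j hjD
    have hjget : PySem.List.pyGetD ps j (0, 0) = ps[j.toNat]'(by omega) :=
      PySem.List.pyGetD_eq_getElem ps (0, 0) hj0 (by omega)
    -- the doubles value list is nonempty
    have hne : (ps.filter (fun p => p.1 == p.2)).map (fun p => p.1) ≠ [] := by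
      rw [hdm, hDc]; simp
    rw [if_neg hne]
    -- best = val j
    obtain ⟨b, hb⟩ : ∃ b, PySem.List.max? ((ps.filter (fun p => p.1 == p.2)).map (fun p => p.1))
        (fun v => v) = some b := by
      cases hmm : PySem.List.max? ((ps.filter (fun p => p.1 == p.2)).map (fun p => p.1))
          (fun v => v) with
      | none => exact absurd ((PySem.List.max?_eq_none_iff _ _).mp hmm) hne
      | some b => exact ⟨b, rfl⟩
    have hbval : b = (PySem.List.pyGetD ps j (0, 0)).1 := by
      have hbmem := PySem.List.max?_mem hb
      have hbmax := PySem.List.max?_isMax hb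
      rw [hdm] at hbmem hbmax
      obtain ⟨i, hiD, hib⟩ := List.mem_map.mp hbmem
      have h1 : b ≤ (PySem.List.pyGetD ps j (0, 0)).1 := by rw [← hib]; exact hjmax i hiD
      have h2 : (PySem.List.pyGetD ps j (0, 0)).1 ≤ b :=
        hbmax _ (List.mem_map.mpr ⟨j, hjD, rfl⟩)
      omega
    -- ps[j] = (b, b)
    have hjpair : ps[j.toNat]'(by omega) = (b, b) := by
      have hdd : (ps[j.toNat]'(by omega)).1 = (ps[j.toNat]'(by omega)).2 := by
        have := beq_iff_eq.mp hjdbl; rwa [hjget] at this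
      have hb1 : (ps[j.toNat]'(by omega)).1 = b := by rw [hbval, hjget]
      apply Prod.ext
      · exact hb1
      · rw [← hdd]; exact hb1
    -- index? finds exactly j
    have hidx : PySem.List.index? ps (b, b) = some j.toNat := by
      rw [PySem.List.index?_eq_some_iff]
      refine ⟨ps.take j.toNat, ps.drop (j.toNat + 1), ?_, by simp; omega, ?_⟩
      · conv_lhs => rw [← List.take_append_drop j.toNat ps]
        rw [List.drop_eq_getElem_cons (by omega), hjpair]
      · intro hmemtake
        obtain ⟨k, hk, hkeq⟩ := List.getElem_of_mem hmemtake
        have hk' : k < j.toNat := by simp at hk; omega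
        have hkps : ps[k]'(by omega) = (b, b) := by
          rw [← List.getElem_take]; exact hkeq
        -- then k is a double index before j with value b : contradiction with strictness
        have hkD : (k : Int) ∈ D := by
          rw [hD, List.mem_filter]
          constructor
          · rw [PySem.List.mem_pyRange_one]
            simp only [PySem.List.len_eq]
            constructor
            · positivity
            · exact_mod_cast (by omega : k < ps.length)
          · have : PySem.List.pyGetD ps (k : Int) (0, 0) = ps[k]'(by omega) :=
              PySem.List.pyGetD_eq_getElem ps (0, 0) (by positivity)
                (by exact_mod_cast (by omega : k < ps.length))
            rw [this, hkps]; simp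
        have hlt := hjstrict (k : Int) hkD (by omega)
        have : PySem.List.pyGetD ps (k : Int) (0, 0) = ps[k]'(by omega) :=
          PySem.List.pyGetD_eq_getElem ps (0, 0) (by positivity)
            (by exact_mod_cast (by omega : k < ps.length))
        rw [this, hkps] at hlt
        omega
    simp only [hb, Option.getD_some, hidx]
    omega
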